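-- pv_equiv track=rewrite | github.com/wjdengus98/Algorithms | 프로그래머스/2/132265. 롤케이크 자르기/롤케이크 자르기.py | solution
-- ===== SOURCE A (Python) =====
-- def solution(topping):
--     left = set() # 철수
--     right = {} # 동생
--     cnt = 0 # 공평하게 나누는 거 세는 카운터
--
--     # 처음에는 동생이 다 가짐
--     for t in topping:
--         if t not in right:
--             right[t] = 1
--         else:
--             right[t] += 1
--
--     for t in topping:
--         left.add(t) # 형이 토핑하나씩 추가
--
--         right[t] -= 1 # 동생의 토핑 삭제
--         if right[t] == 0: #동생 토핑 다 떨어질 시 삭제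
--             del right[t]
--
--         if len(left) == len(right):
--             cnt += 1
--     return cnt
-- ===== SOURCE B (Python) =====
-- def solution(topping):
--     # Precompute suffix[i] = number of distinct toppings in topping[i:],
--     # then one left-to-right pass with a single set.
--     suffix = [0]
--     seen = set()
--     for t in reversed(topping):
--         seen.add(t)
--         suffix.append(len(seen))
--     suffix.reverse()
--     left = set()
--     cnt = 0
--     for t, d in zip(topping, suffix[1:]):
--         left.add(t)
--         if len(left) == d:
--             cnt += 1
--     return cnt
-- ===== Notes on version B (the rewrite author's own statement) =====
-- stated objective: alternative
-- what changed: B replaces A's decrementing right-hand counter dict with a precomputed suffix distinct-count table built right-to-left, then a single left-to-right pass with one set comparing its size against the table.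
import Mathlib
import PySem

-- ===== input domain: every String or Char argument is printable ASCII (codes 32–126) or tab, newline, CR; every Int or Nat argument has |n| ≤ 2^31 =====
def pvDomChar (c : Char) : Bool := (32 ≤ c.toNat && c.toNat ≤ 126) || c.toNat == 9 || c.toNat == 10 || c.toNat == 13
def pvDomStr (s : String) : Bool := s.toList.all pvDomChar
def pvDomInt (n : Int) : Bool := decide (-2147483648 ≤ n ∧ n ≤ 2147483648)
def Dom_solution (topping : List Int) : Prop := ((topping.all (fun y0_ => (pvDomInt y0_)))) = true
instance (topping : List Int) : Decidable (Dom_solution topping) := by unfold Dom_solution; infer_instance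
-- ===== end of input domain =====

-- B replaces A's decrementing right-hand counter dict by a precomputed suffix distinct-count
-- table plus a single left-to-right pass with one set (objective: alternative decomposition).

-- ===== PORT A =====
-- A: build a counter dict of all toppings, then sweep left to right, moving each
-- topping from the dict to a left set and counting positions where the sizes agree.
def solution (topping : List Int) : Int :=
  let right : PySem.Dict Int Int :=
    topping.foldl (fun d t => if d.contains t then d.insert t (d.getD t 0 + 1) else d.insert t 1)
      PySem.Dict.empty
  let st := topping.foldl (fun (st : PySem.Set Int × PySem.Dict Int Int × Int) t =>
      let left := PySem.Set.add st.1 t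
      let v := st.2.1.getD t 0 - 1
      let r := st.2.1.insert t v
      let r := if v = 0 then r.erase t else r
      (left, r, if PySem.Set.len left = (r.size : Int) then st.2.2 + 1 else st.2.2))
    (PySem.Set.empty, right, 0)
  st.2.2

-- ===== PORT B =====
-- B: suffix[i] = number of distinct toppings in topping[i:], built right-to-left;
-- then one pass with a left set comparing its size against the table.
def solution_alt (topping : List Int) : Int :=
  let built := topping.reverse.foldl (fun (st : PySem.Set Int × List Int) t =>
      let seen := PySem.Set.add st.1 t
      (seen, st.2 ++ [PySem.Set.len seen])) (PySem.Set.empty, [(0 : Int)])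
  let suffix := built.2.reverse
  let fin := (topping.zip (suffix.drop 1)).foldl (fun (st : PySem.Set Int × Int) td =>
      let left := PySem.Set.add st.1 td.1
      (left, if PySem.Set.len left = td.2 then st.2 + 1 else st.2)) (PySem.Set.empty, 0)
  fin.2

-- ===== PRECONDITION & SPEC =====
def Spec_solution (topping : List Int) (out : Int) : Prop := out = solution_alt topping
instance (topping : List Int) (out : Int) : Decidable (Spec_solution topping out) := by unfold Spec_solution; infer_instance

-- ===== CLAIM (what is proved, stated in full; the proofs are below) =====
def Claim_equal_solution : Prop := ∀ (topping : List Int), Dom_solution topping → Spec_solution topping (solution topping)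

-- ===== LEMMAS AND PROOFS =====

-- number of distinct elements of a list, as Python's len(set(l))
def pvDcount (l : List Int) : Int := PySem.Set.len (PySem.Set.ofList l)

-- common reference recursion: walking the list with the growing left set,
-- counting positions where the left set's size equals the distinct count of the rest
def pvF : List Int → PySem.Set Int → Int
  | [], _ => 0
  | t :: s, left =>
      (if PySem.Set.len (PySem.Set.add left t) = pvDcount s then 1 else 0)
        + pvF s (PySem.Set.add left t)

lemma pvDcount_congr (l₁ l₂ : List Int) (h : ∀ x, x ∈ l₁ ↔ x ∈ l₂) :
    pvDcount l₁ = pvDcount l₂ := by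
  have hp : (PySem.Set.ofList l₁).Perm (PySem.Set.ofList l₂) := by
    rw [List.perm_ext_iff_of_nodup (PySem.Set.nodup_ofList l₁) (PySem.Set.nodup_ofList l₂)]
    intro a; simp [PySem.Set.mem_ofList, h a]
  simp [pvDcount, PySem.Set.len, hp.length_eq]

-- ---- A side ----

-- the invariant tying A's dict to the remaining suffix s
def pvInv (d : PySem.Dict Int Int) (s : List Int) : Prop :=
  d.keys.Nodup ∧ ∀ k : Int, d.get? k = if 0 < s.count k then some (s.count k : Int) else none

lemma keys_erase_filter (d : PySem.Dict Int Int) (k : Int) :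
    (d.erase k).keys = d.keys.filter (fun x => !(x == k)) := by
  simp only [PySem.Dict.erase, PySem.Dict.keys]
  rw [List.filter_map]
  rfl

lemma get?_erase_dict (d : PySem.Dict Int Int) (k j : Int) :
    (d.erase k).get? j = if j = k then none else d.get? j := by
  split_ifs with h
  · subst h
    simp only [PySem.Dict.erase, PySem.Dict.get?, Option.map_eq_none_iff, List.find?_eq_none]
    intro p hp
    have := (List.mem_filter.mp hp).2
    simp at this ⊢
    omega
  · simp only [PySem.Dict.erase, PySem.Dict.get?]
    congr 1
    induction d.items with
    | nil => rfl
    | cons p rest ih =>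
        have hkj : (k == j) = false := by simp; omega
        by_cases hk : p.1 = k
        · simp [hk, hkj, ih]
        · by_cases hp : p.1 = j <;> simp [hk, hp, h, ih]

lemma pvInv_counter (xs : List Int) : pvInv (PySem.Dict.counter xs) xs := by
  refine ⟨PySem.Dict.nodup_keys_counter xs, fun k => ?_⟩
  by_cases h : 0 < xs.count k
  · have hmem : k ∈ (PySem.Dict.counter xs).keys := by
      rw [PySem.Dict.keys_counter, PySem.Set.mem_ofList]
      exact List.count_pos_iff.mp h
    have : (PySem.Dict.counter xs).get? k ≠ none := by
      intro hnone
      exact ((PySem.Dict.get?_eq_none_iff_not_mem_keys _ _).mp hnone) hmem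
    obtain ⟨v, hv⟩ := Option.ne_none_iff_exists'.mp this
    have := PySem.Dict.getD_of_get?_eq_some (PySem.Dict.counter xs) (0 : Int) hv
    rw [PySem.Dict.getD_counter] at this
    simp [h, hv, ← this]
  · have hmem : k ∉ (PySem.Dict.counter xs).keys := by
      rw [PySem.Dict.keys_counter, PySem.Set.mem_ofList]
      intro hk; exact h (List.count_pos_iff.mpr hk)
    rw [show ((PySem.Dict.counter xs).get? k) = none from
      (PySem.Dict.get?_eq_none_iff_not_mem_keys _ _).mpr hmem]
    simp [h]

lemma pvInv_size {d : PySem.Dict Int Int} {s : List Int} (h : pvInv d s) :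
    (d.size : Int) = pvDcount s := by
  obtain ⟨hnd, hg⟩ := h
  have hmem : ∀ k, k ∈ d.keys ↔ k ∈ PySem.Set.ofList s := by
    intro k
    rw [PySem.Set.mem_ofList]
    constructor
    · intro hkm
      by_contra hc
      have h0 : ¬ 0 < s.count k := fun hp => hc (List.count_pos_iff.mp hp)
      exact ((PySem.Dict.get?_eq_none_iff_not_mem_keys d k).mp (by simp [hg k, h0])) hkm
    · intro hkm
      by_contra hkk
      have hnone := (PySem.Dict.get?_eq_none_iff_not_mem_keys d k).mpr hkk
      rw [hg k] at hnone
      simp [List.count_pos_iff.mpr hkm] at hnone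
  have hp : d.keys.Perm (PySem.Set.ofList s) :=
    (List.perm_ext_iff_of_nodup hnd (PySem.Set.nodup_ofList s)).mpr hmem
  have hk : d.keys.length = (PySem.Set.ofList s).length := hp.length_eq
  simp only [PySem.Dict.keys, List.length_map] at hk
  simp [PySem.Dict.size, pvDcount, PySem.Set.len, hk]

-- one step of A's sweep preserves the invariant
lemma pvInv_step {d : PySem.Dict Int Int} {t : Int} {s : List Int} (h : pvInv d (t :: s)) :
    pvInv (if d.getD t 0 - 1 = 0 then (d.insert t (d.getD t 0 - 1)).erase t
           else d.insert t (d.getD t 0 - 1)) s := by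
  obtain ⟨hnd, hg⟩ := h
  have hgt : d.get? t = some ((s.count t : Int) + 1) := by
    have := hg t
    simp at this
    simpa [add_comm] using this
  have hdt : d.getD t 0 = (s.count t : Int) + 1 := PySem.Dict.getD_of_get?_eq_some d 0 hgt
  have hv : d.getD t 0 - 1 = (s.count t : Int) := by omega
  by_cases h0 : d.getD t 0 - 1 = 0
  · have hct : s.count t = 0 := by omega
    rw [if_pos h0]
    constructor
    · rw [keys_erase_filter]
      exact (PySem.Dict.nodup_keys_insert d t _ hnd).filter _
    · intro k
      rw [get?_erase_dict, PySem.Dict.get?_insert]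
      by_cases hk : k = t
      · simp [hk, hct]
      · have : s.count k = (t :: s).count k := by simp [List.count_cons]; omega
        simp [hk, hg k, ← this]
  · rw [if_neg h0]
    have hct : 0 < s.count t := by omega
    constructor
    · exact PySem.Dict.nodup_keys_insert d t _ hnd
    · intro k
      rw [PySem.Dict.get?_insert]
      by_cases hk : k = t
      · simp [hk, hct, hv]
      · have : s.count k = (t :: s).count k := by simp [List.count_cons]; omega
        simp [hk, hg k, ← this]

lemma pvLoopA (s : List Int) : ∀ (left : PySem.Set Int) (d : PySem.Dict Int Int) (cnt : Int),
    pvInv d s →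
    (s.foldl (fun (st : PySem.Set Int × PySem.Dict Int Int × Int) t =>
      let left := PySem.Set.add st.1 t
      let v := st.2.1.getD t 0 - 1
      let r := st.2.1.insert t v
      let r := if v = 0 then r.erase t else r
      (left, r, if PySem.Set.len left = (r.size : Int) then st.2.2 + 1 else st.2.2))
      (left, d, cnt)).2.2 = cnt + pvF s left := by
  induction s with
  | nil => intro left d cnt _; simp [pvF]
  | cons t s ih =>
      intro left d cnt hinv
      have hinv' := pvInv_step hinv
      have hsz := pvInv_size hinv'
      simp only [List.foldl_cons, pvF]
      rw [ih _ _ _ hinv']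
      rw [hsz]
      split_ifs <;> ring

-- ---- B side ----

lemma pvBuildB (r : List Int) : ∀ (seen : PySem.Set Int) (acc : List Int),
    (r.foldl (fun (st : PySem.Set Int × List Int) t =>
        let seen := PySem.Set.add st.1 t
        (seen, st.2 ++ [PySem.Set.len seen])) (seen, acc)).2
    = acc ++ (List.range r.length).map
        (fun k => PySem.Set.len ((r.take (k + 1)).foldl PySem.Set.add seen)) := by
  induction r with
  | nil => intro seen acc; simp
  | cons t r ih =>
      intro seen acc
      simp only [List.foldl_cons, List.length_cons]
      rw [ih]
      rw [List.range_succ_eq_map]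
      simp [List.map_map, Function.comp_def]

lemma pvSeen_eq_ofList (l : List Int) :
    l.foldl PySem.Set.add PySem.Set.empty = PySem.Set.ofList l :=
  (PySem.Set.ofList_eq_foldl l).symm

lemma pvLoopB (l : List Int) : ∀ (ds : List Int) (left : PySem.Set Int) (cnt : Int),
    (∀ j, j < l.length → ds[j]? = some (pvDcount (l.drop (j + 1)))) →
    ((l.zip ds).foldl (fun (st : PySem.Set Int × Int) td =>
        let left := PySem.Set.add st.1 td.1
        (left, if PySem.Set.len left = td.2 then st.2 + 1 else st.2))
      (left, cnt)).2 = cnt + pvF l left := by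
  induction l with
  | nil => intro ds left cnt _; simp [pvF]
  | cons t l ih =>
      intro ds left cnt hds
      have h0 := hds 0 (by simp)
      obtain ⟨d0, ds', rfl⟩ : ∃ d0 ds', ds = d0 :: ds' := by
        cases ds with
        | nil => simp at h0
        | cons a b => exact ⟨a, b, rfl⟩
      have hd0 : d0 = pvDcount l := by simpa using h0
      simp only [List.zip_cons_cons, List.foldl_cons, pvF]
      rw [ih ds' _ _ (fun j hj => by simpa using hds (j + 1) (by simpa using hj))]
      subst hd0
      split_ifs <;> ring

-- the suffix table entry lemma: entry j of suffix.drop 1 is pvDcount (topping.drop (j+1))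
lemma pvSuffixEntry (topping : List Int) (j : Nat) (hj : j < topping.length) :
    ((((0 : Int) :: (List.range topping.length).map
        (fun k => PySem.Set.len ((topping.reverse.take (k + 1)).foldl PySem.Set.add
          PySem.Set.empty))).reverse.drop 1)[j]? = some (pvDcount (topping.drop (j + 1)))) := by
  set n := topping.length with hn
  have hrev : ∀ m : Nat, m ≤ n → topping.reverse.take m = (topping.drop (n - m)).reverse := by
    intro m hm
    have h2 := @List.reverse_take Int topping.reverse m
    simp only [List.length_reverse, List.reverse_reverse, ← hn] at h2
    rw [← h2, List.reverse_reverse]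
  have hdc : ∀ m : Nat, m ≤ n →
      PySem.Set.len ((topping.reverse.take m).foldl PySem.Set.add PySem.Set.empty)
        = pvDcount (topping.drop (n - m)) := by
    intro m hm
    rw [pvSeen_eq_ofList, hrev m hm]
    exact pvDcount_congr _ _ (by intro x; simp)
  have hlen : (((0 : Int) :: (List.range n).map
      (fun k => PySem.Set.len ((topping.reverse.take (k + 1)).foldl PySem.Set.add
        PySem.Set.empty))).reverse).length = n + 1 := by simp
  rw [List.getElem?_drop, List.getElem?_reverse (by simp; omega)]
  simp only [List.length_cons, List.length_map, List.length_range]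
  have hidx : n + 1 - 1 - (1 + j) = n - 1 - j := by omega
  rw [hidx]
  by_cases hj1 : j = n - 1
  · subst hj1
    have : n - 1 - (n - 1) = 0 := by omega
    rw [this]
    have hdrop : topping.drop (n - 1 + 1) = [] := by
      apply List.drop_eq_nil_of_le; omega
    simp [hdrop, pvDcount, PySem.Set.len]
  · have hjlt : j < n - 1 := by omega
    have : n - 1 - j = (n - 2 - j) + 1 := by omega
    rw [this]
    simp only [List.getElem?_cons_succ]
    rw [List.getElem?_map, List.getElem?_range (by omega)]
    simp only [Option.map_some]
    have harg : n - (n - 2 - j + 1) = j + 1 := by omega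
    rw [hdc (n - 2 - j + 1) (by omega), harg]

-- A's build loop equals the counter dict
lemma pvBuildA (xs : List Int) :
    xs.foldl (fun d t => if d.contains t then d.insert t (d.getD t 0 + 1) else d.insert t 1)
      PySem.Dict.empty = PySem.Dict.counter xs := by
  rw [← PySem.Dict.foldl_insert_getD_add_one_eq_counter]
  congr 1
  funext d t
  by_cases h : d.contains t
  · simp [h]
  · rw [if_neg (by simp [h]), PySem.Dict.getD_of_not_contains d 0 (by simpa using h)]
    norm_num

-- ===== VERDICT (by name: the statement is the Claim_ definition above) =====
theorem solution_spec : Claim_equal_solution := by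
  unfold Claim_equal_solution
  intro topping _
  unfold Spec_solution solution solution_alt
  simp only
  rw [pvBuildA, pvLoopA topping _ _ _ (pvInv_counter topping)]
  rw [pvBuildB]
  rw [pvLoopB topping _ _ _ (fun j hj => by
    simpa [List.length_reverse] using pvSuffixEntry topping j hj)]
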